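-- pv_equiv track=rewrite | github.com/mnuman/advent-of-code | 2020/day17b.py | next_cell_state
-- ===== SOURCE A (Python) =====
-- import itertools
--
-- ACTIVE_STATE = "#"
--
-- INACTIVE_STATE = "."
--
-- def all_neighbours(x, y, z, w):
--     # Generate all neighbours for the given point - except the point itself
--     offsets = [
--         *itertools.product((-1, 0, 1), (-1, 0, 1), (-1, 0, 1), (-1, 0, 1))]
--     offsets.remove((0, 0, 0, 0))
--     return [(x + offset_x, y + offset_y, z + offset_z, w + offset_w) for
--             offset_x, offset_y, offset_z, offset_w in offsets]
--
-- def get_current_cell_state(current_state, x, y, z, w):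
--     # if the point does not yet exist it is inactive
--     return current_state[(x, y, z, w)] \
--         if (x, y, z, w) in current_state else INACTIVE_STATE
--
-- def next_cell_state(current_state, x, y, z, w):
--     active_neighbours = sum(
--         [1 if get_current_cell_state(current_state, *n) == ACTIVE_STATE else 0
--          for n in all_neighbours(x, y, z, w)])
--     calculated_state = ACTIVE_STATE \
--         if (get_current_cell_state(current_state, x, y, z,
--                                    w) == ACTIVE_STATE and
--             active_neighbours in (2, 3)) or \
--            (get_current_cell_state(current_state, x, y, z,
--                                    w) == INACTIVE_STATE and
--             active_neighbours == 3) else INACTIVE_STATE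
--     return calculated_state
-- ===== SOURCE B (Python) =====
-- ACTIVE_STATE = "#"
-- INACTIVE_STATE = "."
--
-- def next_cell_state(current_state, x, y, z, w):
--     # Count active neighbours by scanning the stored cells once instead of
--     # generating the 80 neighbour offsets.
--     active_neighbours = 0
--     for (cx, cy, cz, cw), v in current_state.items():
--         if v == ACTIVE_STATE and max(abs(cx - x), abs(cy - y), abs(cz - z), abs(cw - w)) == 1:
--             active_neighbours += 1
--     me = current_state.get((x, y, z, w), INACTIVE_STATE)
--     return ACTIVE_STATE if (me == ACTIVE_STATE and active_neighbours in (2, 3)) or \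
--                            (me == INACTIVE_STATE and active_neighbours == 3) else INACTIVE_STATE
-- ===== Notes on version B (the rewrite author's own statement) =====
-- stated objective: alternative
-- what changed: B computes active_neighbours by a single scan of the stored cells, counting entries whose value is ACTIVE_STATE and whose Chebyshev distance to (x,y,z,w) is 1, instead of generating the 80 neighbour offsets and looking each one up; Pre_ excludes association lists with duplicate coordinate keys, which no Python dict can encode.
import Mathlib
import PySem

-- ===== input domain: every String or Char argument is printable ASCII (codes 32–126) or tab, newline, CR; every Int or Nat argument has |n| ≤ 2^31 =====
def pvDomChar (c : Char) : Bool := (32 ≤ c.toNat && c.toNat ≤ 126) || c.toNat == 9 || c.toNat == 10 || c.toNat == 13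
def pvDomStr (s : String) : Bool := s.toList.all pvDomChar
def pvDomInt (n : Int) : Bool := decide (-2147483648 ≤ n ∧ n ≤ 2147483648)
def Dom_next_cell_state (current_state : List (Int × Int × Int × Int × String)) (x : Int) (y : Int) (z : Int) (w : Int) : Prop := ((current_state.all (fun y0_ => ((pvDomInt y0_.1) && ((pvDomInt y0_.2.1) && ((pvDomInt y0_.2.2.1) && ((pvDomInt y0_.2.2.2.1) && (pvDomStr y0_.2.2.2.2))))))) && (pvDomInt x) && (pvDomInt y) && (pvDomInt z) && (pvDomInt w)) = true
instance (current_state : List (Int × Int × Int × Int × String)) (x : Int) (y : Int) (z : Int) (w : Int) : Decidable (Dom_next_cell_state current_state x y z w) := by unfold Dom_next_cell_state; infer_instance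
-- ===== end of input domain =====

-- B counts active neighbours by one scan over the stored cells (entries at Chebyshev
-- distance 1 holding "#") instead of generating the 80 neighbour offsets and looking
-- each one up; the Conway rule itself is unchanged.

-- shared helper: the coordinate key of a stored dict entry, and the first-match dict
-- lookup ('(x,y,z,w) in d' + 'd[(x,y,z,w)]' in A, 'd.get(...)' in B)
def pvKey (e : Int × Int × Int × Int × String) : Int × Int × Int × Int :=
  (e.1, e.2.1, e.2.2.1, e.2.2.2.1)

def pvLookup (cs : List (Int × Int × Int × Int × String)) (k : Int × Int × Int × Int) : Option String :=
  match cs with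
  | [] => none
  | e :: t => if pvKey e = k then some e.2.2.2.2 else pvLookup t k

-- ===== PORT A =====
-- offsets = [*itertools.product((-1,0,1), ×4)]; offsets.remove((0,0,0,0))
def pvOffsets : List (Int × Int × Int × Int) :=
  let prod := ([-1, 0, 1] : List Int).flatMap (fun a =>
    ([-1, 0, 1] : List Int).flatMap (fun b =>
      ([-1, 0, 1] : List Int).flatMap (fun c =>
        ([-1, 0, 1] : List Int).map (fun d => (a, b, c, d)))))
  (PySem.List.remove? prod (0, 0, 0, 0)).getD []  -- remove? never fails: (0,0,0,0) is in the product

def all_neighbours (x : Int) (y : Int) (z : Int) (w : Int) : List (Int × Int × Int × Int) :=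
  pvOffsets.map (fun o => (x + o.1, y + o.2.1, z + o.2.2.1, w + o.2.2.2))

def get_current_cell_state (cs : List (Int × Int × Int × Int × String)) (x y z w : Int) : String :=
  (pvLookup cs (x, y, z, w)).getD "."

def next_cell_state (current_state : List (Int × Int × Int × Int × String)) (x : Int) (y : Int) (z : Int) (w : Int) : String :=
  let active_neighbours : Int :=
    ((all_neighbours x y z w).map (fun n =>
      if get_current_cell_state current_state n.1 n.2.1 n.2.2.1 n.2.2.2 = "#" then (1 : Int) else 0)).sum
  if (get_current_cell_state current_state x y z w = "#" ∧
        (active_neighbours = 2 ∨ active_neighbours = 3)) ∨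
     (get_current_cell_state current_state x y z w = "." ∧ active_neighbours = 3)
  then "#" else "."

-- ===== PORT B =====
def next_cell_state_alt (current_state : List (Int × Int × Int × Int × String)) (x : Int) (y : Int) (z : Int) (w : Int) : String :=
  let active_neighbours : Int :=
    current_state.foldl (fun acc e =>
      if e.2.2.2.2 = "#" ∧
         max (max (max |e.1 - x| |e.2.1 - y|) |e.2.2.1 - z|) |e.2.2.2.1 - w| = 1
      then acc + 1 else acc) 0
  let me := (pvLookup current_state (x, y, z, w)).getD "."
  if (me = "#" ∧ (active_neighbours = 2 ∨ active_neighbours = 3)) ∨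
     (me = "." ∧ active_neighbours = 3)
  then "#" else "."

-- ===== PRECONDITION & SPEC =====
-- Pre_ excludes association lists whose coordinate keys repeat: a Python dict cannot
-- hold duplicate keys, so such lists encode no input the Python function receives.
def Pre_next_cell_state (current_state : List (Int × Int × Int × Int × String)) (x : Int) (y : Int) (z : Int) (w : Int) : Prop :=
  (current_state.map pvKey).Nodup
instance (current_state : List (Int × Int × Int × Int × String)) (x : Int) (y : Int) (z : Int) (w : Int) : Decidable (Pre_next_cell_state current_state x y z w) := by unfold Pre_next_cell_state; infer_instance

def pvWitness_next_cell_state : (List (Int × Int × Int × Int × String)) × Int × Int × Int × Int :=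
  ([(0, 0, 0, 1, "#"), (0, 1, 0, 1, "#"), (1, 0, 0, 0, "#")], 0, 0, 0, 0)

def Spec_next_cell_state (current_state : List (Int × Int × Int × Int × String)) (x : Int) (y : Int) (z : Int) (w : Int) (out : String) : Prop := out = next_cell_state_alt current_state x y z w
instance (current_state : List (Int × Int × Int × Int × String)) (x : Int) (y : Int) (z : Int) (w : Int) (out : String) : Decidable (Spec_next_cell_state current_state x y z w out) := by unfold Spec_next_cell_state; infer_instance

-- ===== CLAIM (what is proved, stated in full; the proofs are below) =====
def Claim_equal_next_cell_state : Prop := ∀ (current_state : List (Int × Int × Int × Int × String)) (x : Int) (y : Int) (z : Int) (w : Int), Dom_next_cell_state current_state x y z w → Pre_next_cell_state current_state x y z w → Spec_next_cell_state current_state x y z w (next_cell_state current_state x y z w)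

-- ===== LEMMAS AND PROOFS =====

theorem pvOffsets_eq : pvOffsets = [(-1, -1, -1, -1), (-1, -1, -1, 0), (-1, -1, -1, 1), (-1, -1, 0, -1), (-1, -1, 0, 0), (-1, -1, 0, 1), (-1, -1, 1, -1), (-1, -1, 1, 0), (-1, -1, 1, 1), (-1, 0, -1, -1), (-1, 0, -1, 0), (-1, 0, -1, 1), (-1, 0, 0, -1), (-1, 0, 0, 0), (-1, 0, 0, 1), (-1, 0, 1, -1), (-1, 0, 1, 0), (-1, 0, 1, 1), (-1, 1, -1, -1), (-1, 1, -1, 0), (-1, 1, -1, 1), (-1, 1, 0, -1), (-1, 1, 0, 0), (-1, 1, 0, 1), (-1, 1, 1, -1), (-1, 1, 1, 0), (-1, 1, 1, 1), (0, -1, -1, -1), (0, -1, -1, 0), (0, -1, -1, 1), (0, -1, 0, -1), (0, -1, 0, 0), (0, -1, 0, 1), (0, -1, 1, -1), (0, -1, 1, 0), (0, -1, 1, 1), (0, 0, -1, -1), (0, 0, -1, 0), (0, 0, -1, 1), (0, 0, 0, -1), (0, 0, 0, 1), (0, 0, 1, -1), (0, 0, 1, 0), (0, 0, 1, 1), (0,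 1, -1, -1), (0, 1, -1, 0), (0, 1, -1, 1), (0, 1, 0, -1), (0, 1, 0, 0), (0, 1, 0, 1), (0, 1, 1, -1), (0, 1, 1, 0), (0, 1, 1, 1), (1, -1, -1, -1), (1, -1, -1, 0), (1, -1, -1, 1), (1, -1, 0, -1), (1, -1, 0, 0), (1, -1, 0, 1), (1, -1, 1, -1), (1, -1, 1, 0), (1, -1, 1, 1), (1, 0, -1, -1), (1, 0, -1, 0), (1, 0, -1, 1), (1, 0, 0, -1), (1, 0, 0, 0), (1, 0, 0, 1), (1, 0, 1, -1), (1, 0, 1, 0), (1, 0, 1, 1), (1, 1, -1, -1), (1, 1, -1, 0), (1, 1, -1, 1), (1, 1, 0, -1), (1, 1, 0, 0), (1, 1, 0, 1), (1, 1, 1, -1), (1, 1, 1, 0), (1, 1, 1, 1)] := by rfl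

theorem pvLookup_eq_none (l : List (Int × Int × Int × Int × String)) (k : Int × Int × Int × Int)
    (h : k ∉ l.map pvKey) : pvLookup l k = none := by
  induction l with
  | nil => rfl
  | cons e t ih =>
    simp only [List.map_cons, List.mem_cons, not_or] at h
    simp only [pvLookup, ih h.2]
    exact if_neg (fun he => h.1 he.symm)

theorem off_all : pvOffsets.all (fun o =>
    decide (max (max (max |o.1| |o.2.1|) |o.2.2.1|) |o.2.2.2| = 1)) = true := by
  rw [pvOffsets_eq]; decide

theorem off_mem (a b c d : Int) :
    (a, b, c, d) ∈ pvOffsets ↔ max (max (max |a| |b|) |c|) |d| = 1 := by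
  constructor
  · intro h
    simpa using List.all_eq_true.mp off_all _ h
  · intro h
    have h1 : |a| ≤ 1 := le_trans (le_trans (le_trans (le_max_left _ _) (le_max_left _ _)) (le_max_left _ _)) h.le
    have h2 : |b| ≤ 1 := le_trans (le_trans (le_trans (le_max_right _ _) (le_max_left _ _)) (le_max_left _ _)) h.le
    have h3 : |c| ≤ 1 := le_trans (le_trans (le_max_right _ _) (le_max_left _ _)) h.le
    have h4 : |d| ≤ 1 := le_trans (le_max_right _ _) h.le
    rw [abs_le] at h1 h2 h3 h4
    have ha : a = -1 ∨ a = 0 ∨ a = 1 := by omega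
    have hb : b = -1 ∨ b = 0 ∨ b = 1 := by omega
    have hc : c = -1 ∨ c = 0 ∨ c = 1 := by omega
    have hd : d = -1 ∨ d = 0 ∨ d = 1 := by omega
    rw [pvOffsets_eq]
    rcases ha with rfl | rfl | rfl <;> rcases hb with rfl | rfl | rfl <;>
      rcases hc with rfl | rfl | rfl <;> rcases hd with rfl | rfl | rfl <;>
      revert h <;> decide

theorem mem_all_neighbours (x y z w : Int) (p : Int × Int × Int × Int) :
    p ∈ all_neighbours x y z w ↔
      max (max (max |p.1 - x| |p.2.1 - y|) |p.2.2.1 - z|) |p.2.2.2 - w| = 1 := by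
  obtain ⟨a, b, c, d⟩ := p
  simp only [all_neighbours, List.mem_map]
  constructor
  · rintro ⟨⟨oa, ob, oc, od⟩, ho, he⟩
    have hm := (off_mem oa ob oc od).mp ho
    obtain ⟨rfl, rfl, rfl, rfl⟩ : x + oa = a ∧ y + ob = b ∧ z + oc = c ∧ w + od = d := by
      simpa [Prod.ext_iff] using he
    simpa [add_sub_cancel_left] using hm
  · intro h
    refine ⟨(a - x, b - y, c - z, d - w), (off_mem _ _ _ _).mpr h, ?_⟩
    simp only [Prod.ext_iff]
    refine ⟨by ring, by ring, by ring, by ring⟩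

theorem neighbours_nodup (x y z w : Int) : (all_neighbours x y z w).Nodup := by
  apply List.Nodup.map
  · rintro ⟨a1, a2, a3, a4⟩ ⟨b1, b2, b3, b4⟩ h
    simp only [Prod.ext_iff] at h ⊢
    omega
  · rw [pvOffsets_eq]; decide

theorem countP_update {α : Type} (l : List α) (hl : l.Nodup) (k : α) (hk : k ∈ l)
    (p q : α → Bool) (hq : q k = true) (hp : p k = false)
    (h : ∀ n ∈ l, n ≠ k → q n = p n) : l.countP q = l.countP p + 1 := by
  induction l with
  | nil => cases hk
  | cons a t ih =>
    obtain ⟨hat, hnt⟩ := List.nodup_cons.mp hl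
    by_cases hak : a = k
    · subst hak
      rw [List.countP_cons, List.countP_cons, hq, hp]
      have hc : t.countP q = t.countP p :=
        List.countP_congr (fun n hn => by
          rw [h n (List.mem_cons_of_mem _ hn) (fun hnk => hat (hnk ▸ hn))])
      simp [hc]
    · have hkt : k ∈ t := (List.mem_cons.mp hk).resolve_left (fun e => hak e.symm)
      rw [List.countP_cons, List.countP_cons,
        h a List.mem_cons_self hak,
        ih hnt hkt (fun n hn hnk => h n (List.mem_cons_of_mem _ hn) hnk)]
      omega

theorem count_main (x y z w : Int) (cs : List (Int × Int × Int × Int × String))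
    (h : (cs.map pvKey).Nodup) :
    (all_neighbours x y z w).countP (fun n => decide ((pvLookup cs n).getD "." = "#"))
      = cs.countP (fun e => decide (e.2.2.2.2 = "#" ∧
          max (max (max |e.1 - x| |e.2.1 - y|) |e.2.2.1 - z|) |e.2.2.2.1 - w| = 1)) := by
  induction cs with
  | nil => simp [pvLookup]
  | cons e t ih =>
    rw [List.map_cons, List.nodup_cons] at h
    obtain ⟨hke, hnt⟩ := h
    have hlt : pvLookup t (pvKey e) = none := pvLookup_eq_none t _ hke
    have hcons : ∀ n, pvLookup (e :: t) n = if pvKey e = n then some e.2.2.2.2 else pvLookup t n :=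
      fun _ => rfl
    by_cases hb : e.2.2.2.2 = "#" ∧
        max (max (max |e.1 - x| |e.2.1 - y|) |e.2.2.1 - z|) |e.2.2.2.1 - w| = 1
    · obtain ⟨hv, hc⟩ := hb
      have hkN : pvKey e ∈ all_neighbours x y z w :=
        (mem_all_neighbours x y z w (pvKey e)).mpr hc
      rw [countP_update (all_neighbours x y z w) (neighbours_nodup x y z w) (pvKey e) hkN
          (fun n => decide ((pvLookup t n).getD "." = "#")) _
          (by simp [hcons, hv]) (by simp [hlt])
          (fun n _ hnk => by simp [hcons, Ne.symm hnk])]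
      rw [ih hnt, List.countP_cons]
      rw [decide_eq_true (⟨hv, hc⟩ : e.2.2.2.2 = "#" ∧
          max (max (max |e.1 - x| |e.2.1 - y|) |e.2.2.1 - z|) |e.2.2.2.1 - w| = 1)]
      rfl
    · rw [List.countP_cons]
      have hpb : decide (e.2.2.2.2 = "#" ∧
          max (max (max |e.1 - x| |e.2.1 - y|) |e.2.2.1 - z|) |e.2.2.2.1 - w| = 1) = false := by
        simpa using hb
      rw [hpb, ← ih hnt]
      simp only [Bool.false_eq_true, if_false, Nat.add_zero]
      refine List.countP_congr (fun n hn => ?_)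
      by_cases hk : pvKey e = n
      · subst hk
        have hcN := (mem_all_neighbours x y z w (pvKey e)).mp hn
        have hv : ¬ e.2.2.2.2 = "#" := fun hv => hb ⟨hv, hcN⟩
        simp [hcons, hlt, hv]
      · simp [hcons, hk]

-- ===== VERDICT (by name: the statement is the Claim_ definition above) =====
theorem next_cell_state_spec : Claim_equal_next_cell_state := by
  intro cs x y z w _ hpre
  unfold Spec_next_cell_state
  simp only [next_cell_state, next_cell_state_alt, get_current_cell_state, Prod.mk.eta]
  have hA : ((all_neighbours x y z w).map (fun n =>
      if (pvLookup cs n).getD "." = "#" then (1 : Int) else 0)).sum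
      = ((all_neighbours x y z w).countP (fun n => decide ((pvLookup cs n).getD "." = "#")) : Int) := by
    simpa using PySem.List.sum_map_ite_one_zero
      (fun n => decide ((pvLookup cs n).getD "." = "#")) (all_neighbours x y z w)
  have hB : cs.foldl (fun acc e =>
      if e.2.2.2.2 = "#" ∧
         max (max (max |e.1 - x| |e.2.1 - y|) |e.2.2.1 - z|) |e.2.2.2.1 - w| = 1
      then acc + 1 else acc) 0
      = (cs.countP (fun e => decide (e.2.2.2.2 = "#" ∧
          max (max (max |e.1 - x| |e.2.1 - y|) |e.2.2.1 - z|) |e.2.2.2.1 - w| = 1)) : Int) := by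
    simpa using PySem.List.foldl_count_if (fun e => decide (e.2.2.2.2 = "#" ∧
      max (max (max |e.1 - x| |e.2.1 - y|) |e.2.2.1 - z|) |e.2.2.2.1 - w| = 1)) cs 0
  rw [hA, hB, count_main x y z w cs hpre]
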